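-- pv_equiv track=rewrite | github.com/senna-lang/algorithm | note/algo/greedy/maximumFriendlyPair.py | maximum_friendly_pairs
-- ===== SOURCE A (Python) =====
-- def maximum_friendly_pairs(red_points: list[tuple[int, int]],
--                           blue_points: list[tuple[int, int]]) -> int:
--     """
--     最大仲良しペア数を計算する（貪欲法）
--
--     アルゴリズム:
--     1. 赤い点をy座標で昇順ソート
--     2. 青い点をy座標で昇順ソート
--     3. 各赤い点について、y座標条件を満たす青い点の中で
--        x座標が最小のものを選ぶ
--
--     Args:
--         red_points: 赤い点のリスト [(x, y), ...]
--         blue_points: 青い点のリスト [(x, y), ...]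
--
--     Returns:
--         作成可能な最大ペア数
--     """
--     # 赤い点をy座標で昇順ソート（y座標が同じならx座標で昇順）
--     red_sorted = sorted(red_points, key=lambda p: (p[1], p[0]))
--     # 青い点をy座標で昇順ソート（y座標が同じならx座標で昇順）
--     blue_sorted = sorted(blue_points, key=lambda p: (p[1], p[0]))
--
--     pair_count = 0
--     used = [False] * len(blue_sorted)
--
--     # 赤い点を順に処理
--     for rx, ry in red_sorted:
--         best_idx = -1
--         best_x = float('inf')
--
--         # ry < by を満たす青い点を探す
--         for i in range(len(blue_sorted)):
--             if used[i]:
--                 continue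
--
--             bx, by = blue_sorted[i]
--
--             # y座標がryより小さいまたは等しい場合はスキップ
--             if by <= ry:
--                 continue
--
--             # y座標条件を満たす青い点が見つかった
--             # x座標条件も確認
--             if rx < bx:
--                 # x座標が最小のものを選ぶ（貪欲選択）
--                 if bx < best_x:
--                     best_x = bx
--                     best_idx = i
--
--         # マッチする青い点が見つかった場合
--         if best_idx != -1:
--             used[best_idx] = True
--             pair_count += 1
--
--     return pair_count
-- ===== SOURCE B (Python) =====
-- def _first_gt(xs, x):
--     """xs sorted by first component: first index i with xs[i][0] > x (binary search)."""
--     lo, hi = 0, len(xs)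
--     while lo < hi:
--         mid = (lo + hi) // 2
--         if xs[mid][0] <= x:
--             lo = mid + 1
--         else:
--             hi = mid
--     return lo
--
-- def maximum_friendly_pairs(red_points: list[tuple[int, int]],
--                            blue_points: list[tuple[int, int]]) -> int:
--     """Same greedy matching, reorganised: blues live in ONE list kept sorted by
--     (x, y); for each red (in (y, x) order) the partner is the FIRST remaining
--     blue, in (x, y) order, with bx > rx and by > ry -- which is exactly the
--     minimal-x (tie: minimal-y) eligible blue -- found by a binary search that
--     skips every blue with bx <= rx, then an early-exit scan on y, and deleted
--     in place (no used flags, no argmin pass over all blues)."""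
--     remaining = sorted(blue_points)          # (x, y) lexicographic
--     count = 0
--     for rx, ry in sorted(red_points, key=lambda p: (p[1], p[0])):
--         i = _first_gt(remaining, rx)         # all blues from i on have bx > rx
--         while i < len(remaining):
--             if remaining[i][1] > ry:
--                 del remaining[i]
--                 count += 1
--                 break
--             i += 1
--     return count
-- ===== Notes on version B (the rewrite author's own statement) =====
-- stated objective: faster
-- what changed: Replaces A's used-flag array with a full argmin scan over ALL blues per red by a single shrinking list of blues kept sorted by (x,y): a hand-written binary search skips every blue with bx<=rx and an early-exit scan takes the first remaining blue with by>ry, which is provably the same minimal-x (tie minimal-y) eligible blue A picks; it is then deleted in place.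
import Mathlib
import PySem

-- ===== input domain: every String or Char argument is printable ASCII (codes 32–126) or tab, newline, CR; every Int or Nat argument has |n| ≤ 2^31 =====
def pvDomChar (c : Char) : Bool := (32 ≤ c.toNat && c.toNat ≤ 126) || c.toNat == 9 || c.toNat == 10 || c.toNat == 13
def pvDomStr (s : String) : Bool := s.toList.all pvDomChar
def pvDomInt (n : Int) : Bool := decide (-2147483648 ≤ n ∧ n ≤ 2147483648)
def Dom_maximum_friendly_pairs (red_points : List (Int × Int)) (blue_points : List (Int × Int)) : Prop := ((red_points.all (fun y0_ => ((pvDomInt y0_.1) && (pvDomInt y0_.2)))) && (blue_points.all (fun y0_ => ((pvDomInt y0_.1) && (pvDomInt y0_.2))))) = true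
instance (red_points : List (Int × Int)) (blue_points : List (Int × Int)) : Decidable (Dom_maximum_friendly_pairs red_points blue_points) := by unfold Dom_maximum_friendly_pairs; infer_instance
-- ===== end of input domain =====

-- B replaces A's per-red argmin pass over all blues (with a used-flag array) by one shrinking
-- (x,y)-sorted blue list with a binary search plus early-exit scan; measurably faster in the
-- typical case, same return value (proved below).

-- ===== PORT A =====
-- Python's `best_x = float('inf')` is only a sentinel compared against ints; it is ported
-- exactly as `Option Int` with `none` = infinity (the only float-valued state never leaves
-- the comparison `bx < best_x`).
def maximum_friendly_pairs (red_points : List (Int × Int)) (blue_points : List (Int × Int)) : Int :=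
  let red_sorted := PySem.List.sorted red_points (fun p => toLex (p.2, p.1)) false
  let blue_sorted := PySem.List.sorted blue_points (fun p => toLex (p.2, p.1)) false
  let res := red_sorted.foldl (fun (st : Int × List Bool) (r : Int × Int) =>
      let sel := (PySem.List.pyRange 0 (blue_sorted.length : Int) 1).foldl
        (fun (best : Int × Option Int) (i : Int) =>
          if PySem.List.pyGetD st.2 i false then best
          else
            let b := PySem.List.pyGetD blue_sorted i ((0 : Int), (0 : Int))
            if b.2 ≤ r.2 then best
            else if r.1 < b.1 then
              if (match best.2 with | none => true | some v => b.1 < v) then (i, some b.1) else best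
            else best) ((-1 : Int), (none : Option Int))
      if sel.1 ≠ -1 then (st.1 + 1, PySem.List.pySetD st.2 sel.1 true) else st)
    ((0 : Int), List.replicate blue_sorted.length false)
  res.1

-- ===== PORT B =====
-- helper `_first_gt` of Source B: binary search, first index with xs[i].1 > x
def pvFirstGtAux (xs : List (Int × Int)) (x : Int) (lo hi : Nat) : Nat :=
  if h : lo < hi then
    let mid := (lo + hi) / 2
    if (xs.getD mid (0, 0)).1 ≤ x then pvFirstGtAux xs x (mid + 1) hi
    else pvFirstGtAux xs x lo mid
  else lo
termination_by hi - lo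
decreasing_by all_goals omega

-- the `while i < len(remaining)` scan of Source B: first index ≥ i with xs[i].2 > ry (none = no break)
def pvScanFrom (xs : List (Int × Int)) (ry : Int) (i : Nat) : Option Nat :=
  if h : i < xs.length then
    if ry < (xs.getD i (0, 0)).2 then some i else pvScanFrom xs ry (i + 1)
  else none
termination_by xs.length - i

def maximum_friendly_pairs_alt (red_points : List (Int × Int)) (blue_points : List (Int × Int)) : Int :=
  let red_sorted := PySem.List.sorted red_points (fun p => toLex (p.2, p.1)) false
  let res := red_sorted.foldl (fun (st : List (Int × Int) × Int) (r : Int × Int) =>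
      match pvScanFrom st.1 r.2 (pvFirstGtAux st.1 r.1 0 st.1.length) with
      | some i => (st.1.eraseIdx i, st.2 + 1)
      | none => st)
    (PySem.List.sorted blue_points (fun p => toLex p) false, (0 : Int))
  res.2

-- ===== PRECONDITION & SPEC =====
def Spec_maximum_friendly_pairs (red_points : List (Int × Int)) (blue_points : List (Int × Int)) (out : Int) : Prop := out = maximum_friendly_pairs_alt red_points blue_points
instance (red_points : List (Int × Int)) (blue_points : List (Int × Int)) (out : Int) : Decidable (Spec_maximum_friendly_pairs red_points blue_points out) := by unfold Spec_maximum_friendly_pairs; infer_instance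

-- ===== CLAIM (what is proved, stated in full; the proofs are below) =====
def Claim_equal_maximum_friendly_pairs : Prop := ∀ (red_points : List (Int × Int)) (blue_points : List (Int × Int)), Dom_maximum_friendly_pairs red_points blue_points → Spec_maximum_friendly_pairs red_points blue_points (maximum_friendly_pairs red_points blue_points)


-- ===== LEMMAS AND PROOFS =====

/-! Proof-side vocabulary. `eligb r b` is the pairing condition both programs test;
`unusedVals` reads A's state (used flags zipped with the sorted blues) as the list of
still-available blue values; `candsOf` is the (index, value) list of A's inner-loop
candidates; `pickFW` is A's first-wins argmin fold over those candidates. -/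

def eligb (r b : Int × Int) : Bool := decide (r.1 < b.1 ∧ r.2 < b.2)

def unusedVals (z : List (Bool × (Int × Int))) : List (Int × Int) :=
  (z.filter (fun ub => !ub.1)).map (fun ub => ub.2)

def selA (blue : List (Int × Int)) (used : List Bool) (r : Int × Int) : Int × Option Int :=
  (PySem.List.pyRange 0 (blue.length : Int) 1).foldl
    (fun (best : Int × Option Int) (i : Int) =>
      if PySem.List.pyGetD used i false then best
      else
        let b := PySem.List.pyGetD blue i ((0 : Int), (0 : Int))
        if b.2 ≤ r.2 then best
        else if r.1 < b.1 then
          if (match best.2 with | none => true | some v => b.1 < v) then (i, some b.1) else best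
        else best) ((-1 : Int), (none : Option Int))

def stepA (blue : List (Int × Int)) (st : Int × List Bool) (r : Int × Int) : Int × List Bool :=
  let sel := selA blue st.2 r
  if sel.1 ≠ -1 then (st.1 + 1, PySem.List.pySetD st.2 sel.1 true) else st

def stepB (st : List (Int × Int) × Int) (r : Int × Int) : List (Int × Int) × Int :=
  match pvScanFrom st.1 r.2 (pvFirstGtAux st.1 r.1 0 st.1.length) with
  | some i => (st.1.eraseIdx i, st.2 + 1)
  | none => st

def pickFW (st : Int × Option Int) (cs : List (Int × (Int × Int))) : Int × Option Int :=
  cs.foldl (fun best c =>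
    if (match best.2 with | none => true | some v => c.2.1 < v) then (c.1, some c.2.1) else best) st

def candsOf (r : Int × Int) (z : List (Bool × (Int × Int))) : List (Int × (Int × Int)) :=
  ((PySem.List.enumerate z 0).filter (fun p => !p.2.1 && eligb r p.2.2)).map (fun p => (p.1, p.2.2))

lemma portA_eq (red_points blue_points : List (Int × Int)) :
    maximum_friendly_pairs red_points blue_points =
      ((PySem.List.sorted red_points (fun p => toLex (p.2, p.1)) false).foldl
        (stepA (PySem.List.sorted blue_points (fun p => toLex (p.2, p.1)) false))
        ((0 : Int), List.replicate (PySem.List.sorted blue_points (fun p => toLex (p.2, p.1)) false).length false)).1 := rfl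

lemma portB_eq (red_points blue_points : List (Int × Int)) :
    maximum_friendly_pairs_alt red_points blue_points =
      ((PySem.List.sorted red_points (fun p => toLex (p.2, p.1)) false).foldl stepB
        (PySem.List.sorted blue_points (fun p => toLex p) false, (0 : Int))).2 := rfl

lemma foldl_rel {α β γ : Type} (R : α → β → Prop) (f : α → γ → α) (g : β → γ → β)
    (h : ∀ a b c, R a b → R (f a c) (g b c)) :
    ∀ (l : List γ) (a : α) (b : β), R a b → R (l.foldl f a) (l.foldl g b) := by
  intro l
  induction l with
  | nil => intro a b hab; simpa using hab
  | cons c t ih => intro a b hab; simpa using ih _ _ (h a b c hab)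

lemma unusedVals_replicate (l : List (Int × Int)) :
    unusedVals ((List.replicate l.length false).zip l) = l := by
  induction l with
  | nil => rfl
  | cons x t ih => simpa [unusedVals, List.replicate_succ] using ih

lemma zip_set_left (used : List Bool) (blue : List (Int × Int)) (k : Nat)
    (hk : k < blue.length) (hlen : used.length = blue.length) :
    (used.set k true).zip blue = (used.zip blue).set k (true, blue[k]) := by
  apply List.ext_getElem (by simp [hlen])
  intro i h1 h2
  simp only [List.getElem_zip, List.getElem_set]
  by_cases hik : k = i
  · subst hik; simp [List.getElem_set, hk]
  · simp [List.getElem_set, hik]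

lemma unusedVals_set_erase :
    ∀ (z : List (Bool × (Int × Int))) (k : Nat) (v : Int × Int) (hk : k < z.length),
      z[k] = (false, v) →
      (∀ j (hj : j < z.length), j < k → (z[j]).1 = false → (z[j]).2 ≠ v) →
      unusedVals (z.set k (true, v)) = (unusedVals z).erase v := by
  intro z
  induction z with
  | nil => intro k v hk; simp at hk
  | cons hd t ih =>
    intro k v hk hzk hfirst
    cases k with
    | zero =>
      obtain ⟨u, b⟩ := hd
      simp only [List.getElem_cons_zero] at hzk
      obtain ⟨hu, hb⟩ := Prod.mk.injEq .. ▸ hzk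
      subst hu; subst hb
      simp [unusedVals, List.erase_cons_head]
    | succ k' =>
      simp only [List.getElem_cons_succ] at hzk
      have hk' : k' < t.length := by simpa using hk
      have hrec := ih k' v hk' hzk (by
        intro j hj hjk hu
        have := hfirst (j + 1) (by simpa using hj) (by omega)
        simpa using this hu)
      obtain ⟨u, b⟩ := hd
      cases u with
      | true => simpa [unusedVals, List.set_cons_succ] using hrec
      | false =>
        have hbv : b ≠ v := by
          have := hfirst 0 (by simp) (by omega)
          simpa using this
        have : ((b :: unusedVals t).erase v) = b :: (unusedVals t).erase v :=
          List.erase_cons_tail (by simpa using hbv)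
        simp only [unusedVals, List.set_cons_succ, List.filter_cons, List.map_cons] at *
        simpa [unusedVals, hbv] using hrec

lemma eraseIdx_eq_erase :
    ∀ (l : List (Int × Int)) (j : Nat) (v : Int × Int) (hj : j < l.length),
      l[j] = v → (∀ t (ht : t < l.length), t < j → l[t] ≠ v) →
      l.eraseIdx j = l.erase v := by
  intro l
  induction l with
  | nil => intro j v hj; simp at hj
  | cons a t ih =>
    intro j v hj hlj hfirst
    cases j with
    | zero =>
      simp only [List.getElem_cons_zero] at hlj
      subst hlj; simp [List.eraseIdx, List.erase_cons_head]
    | succ j' =>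
      have hav : a ≠ v := by
        have := hfirst 0 (by simp) (by omega)
        simpa using this
      simp only [List.getElem_cons_succ] at hlj
      have hrec := ih j' v (by simpa using hj) hlj (by
        intro t ht htj
        have := hfirst (t + 1) (by simpa using ht) (by omega)
        simpa using this)
      have herase : (a :: t).erase v = a :: t.erase v := List.erase_cons_tail (by simpa using hav)
      simp [List.eraseIdx, hrec, herase]

lemma pickFW_charG :
    ∀ (cs : List (Int × (Int × Int))) (j x : Int),
      (pickFW (j, some x) cs = (j, some x) ∧ ∀ c ∈ cs, x ≤ c.2.1) ∨
      (∃ pre c post, cs = pre ++ c :: post ∧ pickFW (j, some x) cs = (c.1, some c.2.1) ∧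
        c.2.1 < x ∧ (∀ c' ∈ pre, c.2.1 < c'.2.1) ∧ (∀ c' ∈ post, c.2.1 ≤ c'.2.1)) := by
  intro cs
  induction cs with
  | nil => intro j x; left; exact ⟨rfl, by simp⟩
  | cons c t ih =>
    intro j x
    by_cases hc : c.2.1 < x
    · have hstep : pickFW (j, some x) (c :: t) = pickFW (c.1, some c.2.1) t := by
        simp [pickFW, hc]
      rcases ih c.1 c.2.1 with ⟨heq, hall⟩ | ⟨pre, c', post, hteq, heq, hlt, hpre, hpost⟩
      · right
        exact ⟨[], c, t, rfl, by rw [hstep, heq], hc, by simp, hall⟩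
      · right
        refine ⟨c :: pre, c', post, by rw [hteq]; rfl, by rw [hstep, heq], lt_trans hlt hc, ?_, hpost⟩
        intro c'' hc''
        rcases List.mem_cons.1 hc'' with h | h
        · subst h; exact hlt
        · exact hpre _ h
    · have hstep : pickFW (j, some x) (c :: t) = pickFW (j, some x) t := by
        simp [pickFW, hc]
      rcases ih j x with ⟨heq, hall⟩ | ⟨pre, c', post, hteq, heq, hlt, hpre, hpost⟩
      · left
        refine ⟨by rw [hstep, heq], ?_⟩
        intro c'' hc''
        rcases List.mem_cons.1 hc'' with h | h
        · subst h; exact le_of_not_gt hc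
        · exact hall _ h
      · right
        refine ⟨c :: pre, c', post, by rw [hteq]; rfl, by rw [hstep, heq], hlt, ?_, hpost⟩
        intro c'' hc''
        rcases List.mem_cons.1 hc'' with h | h
        · subst h; exact lt_of_lt_of_le hlt (le_of_not_gt hc)
        · exact hpre _ h

lemma pickFW_char (cs : List (Int × (Int × Int))) :
    (cs = [] ∧ pickFW ((-1 : Int), none) cs = (-1, none)) ∨
    (∃ pre c post, cs = pre ++ c :: post ∧ pickFW ((-1 : Int), none) cs = (c.1, some c.2.1) ∧
      (∀ c' ∈ pre, c.2.1 < c'.2.1) ∧ (∀ c' ∈ post, c.2.1 ≤ c'.2.1)) := by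
  cases cs with
  | nil => left; exact ⟨rfl, rfl⟩
  | cons c t =>
    right
    have hstep : pickFW ((-1 : Int), none) (c :: t) = pickFW (c.1, some c.2.1) t := by
      simp [pickFW]
    rcases pickFW_charG t c.1 c.2.1 with ⟨heq, hall⟩ | ⟨pre, c', post, hteq, heq, hlt, hpre, hpost⟩
    · exact ⟨[], c, t, rfl, by rw [hstep, heq], by simp, hall⟩
    · refine ⟨c :: pre, c', post, by rw [hteq]; rfl, by rw [hstep, heq], ?_, hpost⟩
      intro c'' hc''
      rcases List.mem_cons.1 hc'' with h | h
      · subst h; exact hlt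
      · exact hpre _ h


lemma candsOf_aux (r : Int × Int) :
    ∀ (z : List (Bool × (Int × Int))) (s : Int),
      ((PySem.List.enumerate z s).filter (fun p => !p.2.1 && eligb r p.2.2)).map
          (fun p => p.2.2)
        = (unusedVals z).filter (eligb r) := by
  intro z
  induction z with
  | nil => intro s; simp [unusedVals, PySem.List.enumerate_nil]
  | cons hd t ih =>
    intro s
    obtain ⟨u, b⟩ := hd
    rw [PySem.List.enumerate_cons]
    cases u with
    | true => simpa [unusedVals] using ih (s + 1)
    | false =>
      by_cases he : eligb r b = true
      · have hrec := ih (s + 1)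
        simp only [unusedVals] at hrec ⊢
        simp [List.filter_cons, he, hrec]
      · have hrec := ih (s + 1)
        simp only [unusedVals] at hrec ⊢
        simp [List.filter_cons, he, hrec]

lemma candsOf_map_snd (r : Int × Int) (z : List (Bool × (Int × Int))) :
    (candsOf r z).map (fun c => c.2) = (unusedVals z).filter (eligb r) := by
  unfold candsOf
  rw [List.map_map]
  exact candsOf_aux r z 0

lemma candsOf_pairwise_idx (r : Int × Int) (z : List (Bool × (Int × Int))) :
    List.Pairwise (fun c c' => c.1 < c'.1) (candsOf r z) := by
  unfold candsOf
  have h1 := PySem.List.pairwise_lt_enumerate z 0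
  have h2 := List.Pairwise.sublist
    (List.filter_sublist (p := fun p : Int × (Bool × (Int × Int)) => !p.2.1 && eligb r p.2.2)
      (l := PySem.List.enumerate z 0)) h1
  exact List.pairwise_map.mpr h2

lemma candsOf_pairwise_val (r : Int × Int) (z : List (Bool × (Int × Int)))
    (h : List.Pairwise (fun ub uc => toLex ((ub.2).2, (ub.2).1) ≤ toLex ((uc.2).2, (uc.2).1)) z) :
    List.Pairwise (fun c c' => toLex ((c.2).2, (c.2).1) ≤ toLex ((c'.2).2, (c'.2).1)) (candsOf r z) := by
  unfold candsOf
  have h0 : List.Pairwise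
      (fun ub uc : Bool × (Int × Int) => toLex ((ub.2).2, (ub.2).1) ≤ toLex ((uc.2).2, (uc.2).1))
      ((PySem.List.enumerate z 0).map (fun x => x.2)) := by
    rw [PySem.List.map_snd_enumerate]; exact h
  have h1 := List.pairwise_map.mp h0
  have h2 := List.Pairwise.sublist
    (List.filter_sublist (p := fun p : Int × (Bool × (Int × Int)) => !p.2.1 && eligb r p.2.2)
      (l := PySem.List.enumerate z 0)) h1
  exact List.pairwise_map.mpr h2

lemma candsOf_mem (r : Int × Int) (z : List (Bool × (Int × Int))) (c : Int × (Int × Int))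
    (hc : c ∈ candsOf r z) :
    ∃ (k : Nat) (hk : k < z.length), c.1 = (k : Int) ∧ z[k] = (false, c.2) ∧ eligb r c.2 = true := by
  unfold candsOf at hc
  rcases List.mem_map.1 hc with ⟨p, hp, rfl⟩
  rcases List.mem_filter.1 hp with ⟨hpe, hpred⟩
  have hpred' : p.2.1 = false ∧ eligb r p.2.2 = true := by simpa using hpred
  rcases (PySem.List.mem_enumerate_iff z 0 p).1 hpe with ⟨k, hk, hpk⟩
  subst hpk
  have h1 : (z[k]).1 = false := hpred'.1
  refine ⟨k, hk, by simp, ?_, hpred'.2⟩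
  rw [← h1]

lemma mem_candsOf (r : Int × Int) (z : List (Bool × (Int × Int))) (k : Nat) (hk : k < z.length)
    (hu : (z[k]).1 = false) (he : eligb r (z[k]).2 = true) :
    ((k : Int), (z[k]).2) ∈ candsOf r z := by
  unfold candsOf
  apply List.mem_map.2
  refine ⟨((k : Int), z[k]), ?_, rfl⟩
  apply List.mem_filter.2
  exact ⟨(PySem.List.mem_enumerate_iff z 0 _).2 ⟨k, hk, by simp⟩, by simp [hu, he]⟩

lemma selA_eq (blue : List (Int × Int)) (used : List Bool) (r : Int × Int)
    (hlen : used.length = blue.length) :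
    selA blue used r = pickFW ((-1 : Int), none) (candsOf r (used.zip blue)) := by
  have hz : (used.zip blue).length = blue.length := by
    rw [List.length_zip, hlen, Nat.min_self]
  unfold pickFW candsOf selA
  rw [List.foldl_map, List.foldl_filter,
    PySem.List.enumerate_eq_map_pyRange (used.zip blue) (false, ((0 : Int), (0 : Int))),
    List.foldl_map]
  have hlen2 : PySem.List.len (used.zip blue) = ((blue.length : Nat) : Int) := by
    rw [PySem.List.len_eq, hz]
  rw [hlen2]
  symm
  apply PySem.List.foldl_congr_mem
  intro acc i hi
  obtain ⟨hi0, hi1⟩ := PySem.List.mem_pyRange_one.1 hi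
  have hkb : i.toNat < blue.length := by omega
  have hku : (i : Int) < (used.length : Int) := by omega
  have hkz : (i : Int) < ((used.zip blue).length : Int) := by omega
  rw [PySem.List.pyGetD_eq_getElem (used.zip blue) _ hi0 hkz,
    PySem.List.pyGetD_eq_getElem used false hi0 hku,
    PySem.List.pyGetD_eq_getElem blue ((0 : Int), (0 : Int)) hi0 (by omega),
    List.getElem_zip]
  cases hu : used[i.toNat] with
  | true => simp
  | false =>
    by_cases h1 : (blue[i.toNat]).2 ≤ r.2
    · have hel : eligb r blue[i.toNat] = false := by
        simp only [eligb, decide_eq_false_iff_not]; intro hh; omega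
      simp [h1, hel]
    · by_cases h2 : r.1 < (blue[i.toNat]).1
      · have hel : eligb r blue[i.toNat] = true := by
          simp only [eligb, decide_eq_true_eq]; exact ⟨h2, by omega⟩
        simp [h1, h2, hel]
      · have hel : eligb r blue[i.toNat] = false := by
          simp only [eligb, decide_eq_false_iff_not]; intro hh; omega
        simp [h1, h2, hel]


lemma firstGtAux_spec (xs : List (Int × Int)) (x : Int)
    (hmono : ∀ (i j : Nat) (hi : i < xs.length) (hj : j < xs.length), i ≤ j → (xs[i]).1 ≤ (xs[j]).1) :
    ∀ lo hi, lo ≤ hi → hi ≤ xs.length →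
      (∀ j (hj : j < xs.length), j < lo → (xs[j]).1 ≤ x) →
      (∀ j (hj : j < xs.length), hi ≤ j → x < (xs[j]).1) →
      (∀ j (hj : j < xs.length), j < pvFirstGtAux xs x lo hi → (xs[j]).1 ≤ x) ∧
      (∀ j (hj : j < xs.length), pvFirstGtAux xs x lo hi ≤ j → x < (xs[j]).1) := by
  intro lo hi
  fun_induction pvFirstGtAux xs x lo hi
  · rename_i lo hi h mid hcond ih
    intro hlohi hhile h1 h2
    have hmid : mid < hi := by omega
    have hmidlen : mid < xs.length := by omega
    rw [List.getD_eq_getElem xs (0, 0) hmidlen] at hcond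
    refine ih (by omega) hhile ?_ h2
    intro j hj hjm
    exact le_trans (hmono j mid hj hmidlen (by omega)) hcond
  · rename_i lo hi h mid hcond ih
    intro hlohi hhile h1 h2
    have hmidlen : mid < xs.length := by omega
    rw [List.getD_eq_getElem xs (0, 0) hmidlen] at hcond
    refine ih (by omega) (by omega) h1 ?_
    intro j hj hmj
    exact lt_of_lt_of_le (lt_of_not_ge hcond) (hmono mid j hmidlen hj hmj)
  · rename_i lo hi h
    intro hlohi hhile h1 h2
    refine ⟨h1, ?_⟩
    intro j hj hloj
    exact h2 j hj (by omega)

lemma scanFrom_spec (xs : List (Int × Int)) (ry : Int) (i0 : Nat) :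
    (∀ j, pvScanFrom xs ry i0 = some j →
        i0 ≤ j ∧ ∃ hj : j < xs.length, ry < (xs[j]).2 ∧
          ∀ t (ht : t < xs.length), i0 ≤ t → t < j → ¬ ry < (xs[t]).2) ∧
    (pvScanFrom xs ry i0 = none → ∀ t (ht : t < xs.length), i0 ≤ t → ¬ ry < (xs[t]).2) := by
  fun_induction pvScanFrom xs ry i0
  · rename_i i h hcond
    rw [List.getD_eq_getElem xs (0, 0) h] at hcond
    constructor
    · intro j hj
      obtain rfl : i = j := by simpa using hj
      exact ⟨le_refl _, h, hcond, by intro t ht h1 h2; omega⟩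
    · intro hj; simp at hj
  · rename_i i h hcond ih
    rw [List.getD_eq_getElem xs (0, 0) h] at hcond
    constructor
    · intro j hj
      obtain ⟨hij, hjlen, hy, hmin⟩ := ih.1 j hj
      refine ⟨by omega, hjlen, hy, ?_⟩
      intro t ht h1 h2
      rcases Nat.eq_or_lt_of_le h1 with rfl | h1'
      · exact hcond
      · exact hmin t ht (by omega) h2
    · intro hj t ht h1 h2
      rcases Nat.eq_or_lt_of_le h1 with rfl | h1'
      · exact hcond h2
      · exact ih.2 hj t ht (by omega) h2
  · rename_i i h
    constructor
    · intro j hj; simp at hj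
    · intro _ t ht h1; omega

lemma hmono_of_sorted (rem : List (Int × Int))
    (hs : List.Pairwise (fun a b : Int × Int => toLex a ≤ toLex b) rem) :
    ∀ (i j : Nat) (hi : i < rem.length) (hj : j < rem.length), i ≤ j → (rem[i]).1 ≤ (rem[j]).1 := by
  intro i j hi hj hij
  rcases Nat.eq_or_lt_of_le hij with rfl | hlt
  · exact le_refl _
  · have h := List.pairwise_iff_getElem.1 hs i j hi hj hlt
    rcases Prod.Lex.le_iff.1 h with h1 | ⟨h1, _⟩
    · exact le_of_lt h1
    · exact le_of_eq h1

lemma stepB_none (rem : List (Int × Int)) (cnt : Int) (r : Int × Int)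
    (hs : List.Pairwise (fun a b : Int × Int => toLex a ≤ toLex b) rem)
    (h : ∀ w ∈ rem, eligb r w = false) :
    stepB (rem, cnt) r = (rem, cnt) := by
  have hmono := hmono_of_sorted rem hs
  have hfg := firstGtAux_spec rem r.1 hmono 0 rem.length (by omega) (le_refl _)
    (by intro j hj hj0; exact absurd hj0 (Nat.not_lt_zero j))
    (by intro j hj hlenj; exact absurd hj (by omega))
  cases hscan : pvScanFrom rem r.2 (pvFirstGtAux rem r.1 0 rem.length) with
  | none => simp [stepB, hscan]
  | some j =>
    obtain ⟨hij, hj, hy, _⟩ := (scanFrom_spec rem r.2 _).1 j hscan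
    have hx : r.1 < (rem[j]).1 := hfg.2 j hj hij
    have hel : eligb r rem[j] = true := by
      simp only [eligb, decide_eq_true_eq]; exact ⟨hx, hy⟩
    have := h rem[j] (List.getElem_mem hj)
    rw [hel] at this; exact absurd this (by simp)

lemma stepB_some (rem : List (Int × Int)) (cnt : Int) (r : Int × Int)
    (hs : List.Pairwise (fun a b : Int × Int => toLex a ≤ toLex b) rem)
    (v : Int × Int) (hv : v ∈ rem) (he : eligb r v = true) :
    ∃ v', v' ∈ rem ∧ eligb r v' = true ∧
      (∀ w ∈ rem, eligb r w = true → toLex v' ≤ toLex w) ∧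
      stepB (rem, cnt) r = (rem.erase v', cnt + 1) := by
  have hmono := hmono_of_sorted rem hs
  have hfg := firstGtAux_spec rem r.1 hmono 0 rem.length (by omega) (le_refl _)
    (by intro j hj hj0; exact absurd hj0 (Nat.not_lt_zero j))
    (by intro j hj hlenj; exact absurd hj (by omega))
  have hvx : r.1 < v.1 ∧ r.2 < v.2 := by simpa [eligb] using he
  -- every eligible element sits at an index ≥ the binary-search result
  have hgefg : ∀ (t : Nat) (ht : t < rem.length), eligb r rem[t] = true →
      pvFirstGtAux rem r.1 0 rem.length ≤ t := by
    intro t ht hel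
    obtain ⟨h1, h2⟩ : r.1 < (rem[t]).1 ∧ r.2 < (rem[t]).2 := by simpa [eligb] using hel
    by_contra hlt
    push_neg at hlt
    have := hfg.1 t ht hlt
    omega
  cases hscan : pvScanFrom rem r.2 (pvFirstGtAux rem r.1 0 rem.length) with
  | none =>
    exfalso
    have hnone := (scanFrom_spec rem r.2 _).2 hscan
    obtain ⟨tv, htv, htveq⟩ := List.getElem_of_mem hv
    have htfg := hgefg tv htv (by rw [htveq]; exact he)
    exact (hnone tv htv htfg) (by rw [htveq]; exact hvx.2)
  | some j =>
    obtain ⟨hfgj, hj, hy, hminy⟩ := (scanFrom_spec rem r.2 _).1 j hscan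
    have hx : r.1 < (rem[j]).1 := hfg.2 j hj hfgj
    have he' : eligb r rem[j] = true := by
      simp only [eligb, decide_eq_true_eq]; exact ⟨hx, hy⟩
    have hminIdx : ∀ (t : Nat) (ht : t < rem.length), eligb r rem[t] = true → j ≤ t := by
      intro t ht hel
      obtain ⟨h1, h2⟩ : r.1 < (rem[t]).1 ∧ r.2 < (rem[t]).2 := by simpa [eligb] using hel
      by_contra hlt
      push_neg at hlt
      exact (hminy t ht (hgefg t ht hel) hlt) h2
    refine ⟨rem[j], List.getElem_mem hj, he', ?_, ?_⟩
    · intro w hw hel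
      obtain ⟨tw, htw, htweq⟩ := List.getElem_of_mem hw
      have hjt := hminIdx tw htw (by rw [htweq]; exact hel)
      rcases Nat.eq_or_lt_of_le hjt with rfl | hlt
      · rw [htweq]
      · rw [← htweq]
        exact List.pairwise_iff_getElem.1 hs j tw hj htw hlt
    · have herase : rem.eraseIdx j = rem.erase rem[j] := by
        refine eraseIdx_eq_erase rem j rem[j] hj rfl ?_
        intro t ht htj heq
        have := hminIdx t ht (by rw [heq]; exact he')
        omega
      simp [stepB, hscan, herase]


lemma stepA_spec (blue : List (Int × Int))
    (hb : List.Pairwise (fun a b : Int × Int => toLex (a.2, a.1) ≤ toLex (b.2, b.1)) blue)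
    (used : List Bool) (hlen : used.length = blue.length) (cnt : Int) (r : Int × Int) :
    ((∀ w ∈ unusedVals (used.zip blue), eligb r w = false) ∧
      stepA blue (cnt, used) r = (cnt, used)) ∨
    (∃ v, eligb r v = true ∧
      (∀ w ∈ unusedVals (used.zip blue), eligb r w = true → toLex v ≤ toLex w) ∧
      v ∈ unusedVals (used.zip blue) ∧
      ∃ used', stepA blue (cnt, used) r = (cnt + 1, used') ∧
        used'.length = blue.length ∧
        unusedVals (used'.zip blue) = (unusedVals (used.zip blue)).erase v) := by
  have hz : (used.zip blue).length = blue.length := by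
    rw [List.length_zip, hlen, Nat.min_self]
  have hzsort : List.Pairwise
      (fun ub uc : Bool × (Int × Int) => toLex ((ub.2).2, (ub.2).1) ≤ toLex ((uc.2).2, (uc.2).1))
      (used.zip blue) := by
    have h0 : List.Pairwise (fun a b : Int × Int => toLex (a.2, a.1) ≤ toLex (b.2, b.1))
        ((used.zip blue).map Prod.snd) := by
      rw [List.map_snd_zip (le_of_eq hlen.symm)]; exact hb
    rw [List.pairwise_map] at h0
    exact h0
  have hstep : stepA blue (cnt, used) r =
      (if (selA blue used r).1 ≠ -1
        then (cnt + 1, PySem.List.pySetD used (selA blue used r).1 true)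
        else (cnt, used)) := rfl
  have hsel := selA_eq blue used r hlen
  rcases pickFW_char (candsOf r (used.zip blue)) with ⟨hnil, hres⟩ | ⟨pre, c, post, hcs, hres, hpre, hpost⟩
  · left
    constructor
    · intro w hw
      by_contra hne
      have hw2 : w ∈ (candsOf r (used.zip blue)).map (fun c => c.2) := by
        rw [candsOf_map_snd]
        exact List.mem_filter.2 ⟨hw, by simpa using hne⟩
      rw [hnil] at hw2
      simp at hw2
    · rw [hstep, hsel, hres]
      simp
  · right
    have hcmem : c ∈ candsOf r (used.zip blue) := by
      rw [hcs]; exact List.mem_append_right _ (List.mem_cons_self ..)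
    obtain ⟨k, hk, hc1, hzk, helig⟩ := candsOf_mem r (used.zip blue) c hcmem
    have hkb : k < blue.length := by omega
    have h12 : used[k]'(by omega) = false ∧ blue[k]'hkb = c.2 := by
      have h := hzk
      rw [List.getElem_zip] at h
      exact ⟨by simpa using congrArg Prod.fst h, by simpa using congrArg Prod.snd h⟩
    refine ⟨c.2, helig, ?_, ?_, used.set k true, ?_, by simp [hlen], ?_⟩
    · -- c.2 is the (x,y)-lexicographic minimum of the eligible unused blues
      intro w hw hel
      have hw2 : w ∈ (candsOf r (used.zip blue)).map (fun c => c.2) := by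
        rw [candsOf_map_snd]; exact List.mem_filter.2 ⟨hw, hel⟩
      obtain ⟨c', hc', hc'2⟩ := List.mem_map.1 hw2
      rw [hcs] at hc'
      rcases List.mem_append.1 hc' with hp | hq
      · have hlt := hpre c' hp
        rw [hc'2] at hlt
        exact Prod.Lex.le_iff.2 (Or.inl (by simpa using hlt))
      · rcases List.mem_cons.1 hq with rfl | hq'
        · rw [← hc'2]
        · have hle := hpost c' hq'
          rcases lt_or_eq_of_le hle with hlt | heqx
          · rw [hc'2] at hlt
            exact Prod.Lex.le_iff.2 (Or.inl (by simpa using hlt))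
          · have hpv := candsOf_pairwise_val r (used.zip blue) hzsort
            rw [hcs] at hpv
            have hcross := (List.pairwise_append.1 hpv).2.1
            have hyx := (List.pairwise_cons.1 hcross).1 _ hq'
            rw [← hc'2]
            rcases Prod.Lex.le_iff.1 hyx with hy | ⟨hy, _⟩
            · exact Prod.Lex.le_iff.2 (Or.inr ⟨by simpa using heqx, by simpa using le_of_lt hy⟩)
            · exact Prod.Lex.le_iff.2 (Or.inr ⟨by simpa using heqx, by simpa using le_of_eq hy⟩)
    · -- c.2 is among the unused values
      have hmem : (used.zip blue)[k] ∈ (used.zip blue).filter (fun ub => !ub.1) := by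
        apply List.mem_filter.2
        exact ⟨List.getElem_mem hk, by rw [hzk]; rfl⟩
      have := List.mem_map_of_mem (f := fun ub : Bool × (Int × Int) => ub.2) hmem
      rw [hzk] at this
      exact this
    · -- the A-step increments the count and marks slot k
      rw [hstep, hsel, hres, hc1]
      rw [if_pos (by omega)]
      simp [PySem.List.pySetD_natCast]
    · -- marking slot k erases exactly the first unused copy of c.2
      rw [zip_set_left used blue k hkb hlen, h12.2]
      refine unusedVals_set_erase (used.zip blue) k c.2 (by omega) hzk ?_
      intro j hj hjk hu heq
      have hmem := mem_candsOf r (used.zip blue) j hj hu (by rw [heq]; exact helig)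
      rw [heq] at hmem
      rw [hcs] at hmem
      rcases List.mem_append.1 hmem with hmemp | hmemc
      · have := hpre _ hmemp
        simp at this
      · rcases List.mem_cons.1 hmemc with heqc | hmemq
        · have hjc : ((j : Nat) : Int) = c.1 := by rw [← heqc]
          rw [hc1] at hjc
          omega
        · have hpidx := candsOf_pairwise_idx r (used.zip blue)
          rw [hcs] at hpidx
          have hcross := (List.pairwise_append.1 hpidx).2.1
          have := (List.pairwise_cons.1 hcross).1 _ hmemq
          rw [hc1] at this
          simp at this
          omega

def RelAB (blue : List (Int × Int)) (a : Int × List Bool) (b : List (Int × Int) × Int) : Prop :=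
  a.1 = b.2 ∧ a.2.length = blue.length ∧
    List.Pairwise (fun x y : Int × Int => toLex x ≤ toLex y) b.1 ∧
    (unusedVals (a.2.zip blue)).Perm b.1

lemma stepRel (blue : List (Int × Int))
    (hb : List.Pairwise (fun a b : Int × Int => toLex (a.2, a.1) ≤ toLex (b.2, b.1)) blue) :
    ∀ (a : Int × List Bool) (b : List (Int × Int) × Int) (r : Int × Int),
      RelAB blue a b → RelAB blue (stepA blue a r) (stepB b r) := by
  rintro ⟨cnt, used⟩ ⟨rem, cntB⟩ r ⟨hcnt, hlen, hsort, hperm⟩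
  simp only at hcnt hlen hsort hperm
  rcases stepA_spec blue hb used hlen cnt r with ⟨hnone, heq⟩ |
    ⟨v, hel, hmin, hvmem, used', heqA, hlen', huv'⟩
  · have hnoneB : ∀ w ∈ rem, eligb r w = false := fun w hw => hnone w (hperm.mem_iff.2 hw)
    rw [heq, stepB_none rem cntB r hsort hnoneB]
    exact ⟨hcnt, hlen, hsort, hperm⟩
  · obtain ⟨v', hv'mem, hel', hmin', heqB⟩ :=
      stepB_some rem cntB r hsort v (hperm.mem_iff.1 hvmem) hel
    have hvv' : v = v' := by
      have h1 : toLex v ≤ toLex v' := hmin v' (hperm.mem_iff.2 hv'mem) hel'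
      have h2 : toLex v' ≤ toLex v := hmin' v (hperm.mem_iff.1 hvmem) hel
      exact toLex.injective (le_antisymm h1 h2)
    subst hvv'
    rw [heqA, heqB]
    refine ⟨by simp [hcnt], hlen', ?_, ?_⟩
    · exact List.Pairwise.sublist List.erase_sublist hsort
    · rw [huv']
      exact hperm.erase v

-- ===== VERDICT (by name: the statement is the Claim_ definition above) =====
theorem maximum_friendly_pairs_spec : Claim_equal_maximum_friendly_pairs := by
  intro red_points blue_points _hdom
  show maximum_friendly_pairs red_points blue_points = maximum_friendly_pairs_alt red_points blue_points
  rw [portA_eq, portB_eq]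
  have hb := PySem.List.sorted_pairwise blue_points (fun p : Int × Int => toLex (p.2, p.1))
  have hinit : RelAB (PySem.List.sorted blue_points (fun p => toLex (p.2, p.1)) false)
      ((0 : Int), List.replicate (PySem.List.sorted blue_points (fun p => toLex (p.2, p.1)) false).length false)
      (PySem.List.sorted blue_points (fun p => toLex p) false, (0 : Int)) := by
    refine ⟨rfl, by simp, PySem.List.sorted_pairwise blue_points (fun p : Int × Int => toLex p), ?_⟩
    rw [unusedVals_replicate]
    exact (PySem.List.sorted_perm blue_points (fun p : Int × Int => toLex (p.2, p.1)) false).trans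
      (PySem.List.sorted_perm blue_points (fun p : Int × Int => toLex p) false).symm
  exact (foldl_rel _ _ _ (stepRel _ hb)
    (PySem.List.sorted red_points (fun p => toLex (p.2, p.1)) false) _ _ hinit).1
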